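-- pv_equiv track=rewrite | github.com/akshayayadav/overcl-detection-correction | scripts/overcl-fam-analysis/clade_extraction.py | check_for_clade_overlap
-- ===== SOURCE A (Python) =====
-- def check_for_clade_overlap(ingroup_clade, ingroup_clade_arr):
--     new_clade_detection_flag = 1
--     for clade in ingroup_clade_arr:
--         overlap = list(set(ingroup_clade).intersection(clade))
--         if len(overlap) > 0:
--             new_clade_detection_flag = 0
--             break
--     if new_clade_detection_flag == 1:
--         ingroup_clade_arr.append(ingroup_clade)
--         return 1
--     else:
--         return 0
-- ===== SOURCE B (Python) =====
-- def check_for_clade_overlap(ingroup_clade, ingroup_clade_arr):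
--     seen = set()
--     for clade in ingroup_clade_arr:
--         seen.update(clade)
--     if seen.isdisjoint(ingroup_clade):
--         ingroup_clade_arr.append(ingroup_clade)
--         return 1
--     return 0
-- ===== Notes on version B (the rewrite author's own statement) =====
-- stated objective: alternative
-- what changed: Replaces the per-clade scan with intersection-and-break by one pass that aggregates all stored elements into a single set followed by one disjointness test.
import Mathlib
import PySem

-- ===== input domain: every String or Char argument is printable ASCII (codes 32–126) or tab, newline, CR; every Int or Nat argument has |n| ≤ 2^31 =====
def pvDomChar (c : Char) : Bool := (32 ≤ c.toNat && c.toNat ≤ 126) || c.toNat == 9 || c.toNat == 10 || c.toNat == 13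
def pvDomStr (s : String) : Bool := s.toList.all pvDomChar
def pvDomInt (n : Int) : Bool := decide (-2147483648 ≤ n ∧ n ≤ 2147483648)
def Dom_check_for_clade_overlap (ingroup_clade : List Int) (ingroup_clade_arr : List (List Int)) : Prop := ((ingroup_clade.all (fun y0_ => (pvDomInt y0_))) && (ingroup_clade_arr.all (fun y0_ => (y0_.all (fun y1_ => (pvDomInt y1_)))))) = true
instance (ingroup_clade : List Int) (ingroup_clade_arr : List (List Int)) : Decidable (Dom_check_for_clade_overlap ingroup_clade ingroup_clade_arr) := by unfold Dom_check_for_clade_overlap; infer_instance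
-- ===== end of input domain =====

-- B aggregates all stored elements into one set and does a single disjointness test, instead of
-- A's per-clade intersection loop with break (alternative decomposition, same cost class).
-- Both A and B append ingroup_clade to ingroup_clade_arr when it is new; the equivalence proved
-- here is about the RETURN value (the mutation is identical in both).

-- ===== PORT A =====
-- the for-loop with break: returns the final value of new_clade_detection_flag
def pvLoopA (ingroup_clade : List Int) : List (List Int) → Int
  | [] => 1
  | clade :: rest =>
    -- overlap = list(set(ingroup_clade).intersection(clade)); if len(overlap) > 0: flag = 0; break
    if 0 < (PySem.Set.inter (PySem.Set.ofList ingroup_clade) clade).length then 0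
    else pvLoopA ingroup_clade rest

def check_for_clade_overlap (ingroup_clade : List Int) (ingroup_clade_arr : List (List Int)) : Int :=
  let new_clade_detection_flag := pvLoopA ingroup_clade ingroup_clade_arr
  if new_clade_detection_flag = 1 then 1 else 0

-- ===== PORT B =====
def check_for_clade_overlap_alt (ingroup_clade : List Int) (ingroup_clade_arr : List (List Int)) : Int :=
  let seen := ingroup_clade_arr.foldl PySem.Set.update PySem.Set.empty
  if PySem.Set.isdisjoint seen ingroup_clade then 1 else 0

-- ===== PRECONDITION & SPEC =====
def Spec_check_for_clade_overlap (ingroup_clade : List Int) (ingroup_clade_arr : List (List Int)) (out : Int) : Prop := out = check_for_clade_overlap_alt ingroup_clade ingroup_clade_arr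
instance (ingroup_clade : List Int) (ingroup_clade_arr : List (List Int)) (out : Int) : Decidable (Spec_check_for_clade_overlap ingroup_clade ingroup_clade_arr out) := by unfold Spec_check_for_clade_overlap; infer_instance

-- ===== CLAIM (what is proved, stated in full; the proofs are below) =====
def Claim_equal_check_for_clade_overlap : Prop := ∀ (ingroup_clade : List Int) (ingroup_clade_arr : List (List Int)), Dom_check_for_clade_overlap ingroup_clade ingroup_clade_arr → Spec_check_for_clade_overlap ingroup_clade ingroup_clade_arr (check_for_clade_overlap ingroup_clade ingroup_clade_arr)

-- ===== LEMMAS AND PROOFS =====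

-- membership in the aggregated 'seen' set built by B's folding of set.update
theorem pv_mem_foldl_update (x : Int) (arr : List (List Int)) (s : PySem.Set Int) :
    x ∈ arr.foldl PySem.Set.update s ↔ x ∈ s ∨ ∃ c ∈ arr, x ∈ c := by
  induction arr generalizing s with
  | nil => simp
  | cons c rest ih =>
    simp only [List.foldl_cons, ih, PySem.Set.mem_update, List.mem_cons]
    constructor
    · rintro ((h | h) | ⟨d, hd, hx⟩)
      · exact Or.inl h
      · exact Or.inr ⟨c, Or.inl rfl, h⟩
      · exact Or.inr ⟨d, Or.inr hd, hx⟩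
    · rintro (h | ⟨d, (rfl | hd), hx⟩)
      · exact Or.inl (Or.inl h)
      · exact Or.inl (Or.inr hx)
      · exact Or.inr ⟨d, hd, hx⟩

-- A's loop flag is 1 exactly when no stored clade shares an element with ingroup_clade
theorem pv_loopA_eq_one_iff (ig : List Int) (arr : List (List Int)) :
    pvLoopA ig arr = 1 ↔ ∀ c ∈ arr, ∀ x ∈ ig, x ∉ c := by
  induction arr with
  | nil => simp [pvLoopA]
  | cons c rest ih =>
    have hlen : 0 < (PySem.Set.inter (PySem.Set.ofList ig) c).length ↔ ∃ x ∈ ig, x ∈ c := by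
      rw [List.length_pos_iff_exists_mem]
      constructor
      · rintro ⟨x, hx⟩
        rw [PySem.Set.mem_inter, PySem.Set.mem_ofList] at hx
        exact ⟨x, hx.1, hx.2⟩
      · rintro ⟨x, h1, h2⟩
        exact ⟨x, by rw [PySem.Set.mem_inter, PySem.Set.mem_ofList]; exact ⟨h1, h2⟩⟩
    simp only [pvLoopA]
    split_ifs with h
    · rw [hlen] at h
      obtain ⟨x, hx, hxc⟩ := h
      constructor
      · intro h0; exact absurd h0 (by decide)
      · intro hall; exact absurd hxc (hall c (List.mem_cons_self) x hx)
    · rw [hlen] at h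
      push Not at h
      rw [ih]
      constructor
      · intro hall d hd x hx
        rcases List.mem_cons.mp hd with rfl | hd'
        · exact h x hx
        · exact hall d hd' x hx
      · intro hall d hd x hx
        exact hall d (List.mem_cons_of_mem _ hd) x hx

-- ===== VERDICT (by name: the statement is the Claim_ definition above) =====
theorem check_for_clade_overlap_spec : Claim_equal_check_for_clade_overlap := by
  intro ig arr _
  unfold Spec_check_for_clade_overlap check_for_clade_overlap check_for_clade_overlap_alt
  have hd : PySem.Set.isdisjoint (arr.foldl PySem.Set.update PySem.Set.empty) ig = true ↔
      ∀ c ∈ arr, ∀ x ∈ ig, x ∉ c := by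
    rw [PySem.Set.isdisjoint_iff]
    constructor
    · intro h c hc x hx hxc
      exact h x ((pv_mem_foldl_update x arr _).mpr (Or.inr ⟨c, hc, hxc⟩)) hx
    · intro h x hx hxig
      rcases (pv_mem_foldl_update x arr _).mp hx with h0 | ⟨c, hc, hxc⟩
      · simp [PySem.Set.empty] at h0
      · exact h c hc x hxig hxc
  by_cases hP : ∀ c ∈ arr, ∀ x ∈ ig, x ∉ c
  · rw [if_pos ((pv_loopA_eq_one_iff ig arr).mpr hP), if_pos (hd.mpr hP)]
  · have h1 : pvLoopA ig arr ≠ 1 := fun h => hP ((pv_loopA_eq_one_iff ig arr).mp h)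
    have h2 : ¬ PySem.Set.isdisjoint (arr.foldl PySem.Set.update PySem.Set.empty) ig = true :=
      fun h => hP (hd.mp h)
    rw [if_neg h1, if_neg h2]
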